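-- pv_equiv track=rewrite | github.com/shruthi-22/dm | gsp_harry.py | search_sequence_util
-- ===== SOURCE A (Python) =====
-- def search_sequence_util(sequences, input_sequence):
--     if len(sequences) == 0 or len(input_sequence) == 0:
--         return 0
--     results = []
--     for i,sequence in enumerate(sequences):
--         result = 0
--         if input_sequence[0] in sequence:
--             result += 1
--             if len(sequences) > 1 and len(input_sequence) > 1:
--                 result += search_sequence_util(sequences[i+1:], input_sequence[1:])
--         results.append(result)
--     return max(results)
-- ===== SOURCE B (Python) =====
-- def search_sequence_util(sequences, input_sequence):
--     remaining = input_sequence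
--     for sequence in sequences:
--         if remaining and remaining[0] in sequence:
--             remaining = remaining[1:]
--     return len(input_sequence) - len(remaining)
-- ===== Notes on version B (the rewrite author's own statement) =====
-- stated objective: faster
-- what changed: Replaced the exponential branching recursion (try every sequence index for each input element and take the max) by a single greedy left-to-right pass that pops the next input element whenever the current sequence contains it.
import Mathlib
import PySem

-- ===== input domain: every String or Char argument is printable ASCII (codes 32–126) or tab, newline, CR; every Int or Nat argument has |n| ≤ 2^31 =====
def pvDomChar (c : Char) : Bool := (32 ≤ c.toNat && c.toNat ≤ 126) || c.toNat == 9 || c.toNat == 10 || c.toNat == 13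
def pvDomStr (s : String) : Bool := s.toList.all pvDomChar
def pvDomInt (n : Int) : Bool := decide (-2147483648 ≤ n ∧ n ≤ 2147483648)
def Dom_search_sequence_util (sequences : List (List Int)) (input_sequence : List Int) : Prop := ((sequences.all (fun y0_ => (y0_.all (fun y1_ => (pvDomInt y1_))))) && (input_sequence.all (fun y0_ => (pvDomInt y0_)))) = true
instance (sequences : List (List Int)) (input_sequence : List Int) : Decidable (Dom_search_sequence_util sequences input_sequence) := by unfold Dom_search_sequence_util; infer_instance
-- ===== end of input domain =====

-- B replaces A's exponential try-every-index recursion by one greedy pass over the sequences (objective: faster).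

-- ===== PORT A =====
-- A's loop 'for i, sequence in enumerate(sequences)' building `results`, transcribed as
-- structural recursion over the remaining part of `sequences`; `orig` is the call's own
-- `sequences` argument (read by the `len(sequences) > 1` guard and `input_sequence[0]`
-- stays the call's input head), `rem` the loop remainder, so `sequences[i+1:]` is `rest`.
mutual
def search_sequence_util (sequences : List (List Int)) (input_sequence : List Int) : Int :=
  if sequences.length = 0 ∨ input_sequence.length = 0 then 0
  else
    (PySem.List.max? (pvALoop sequences input_sequence sequences) (fun y => y)).getD 0
termination_by (sequences.length, 1)

def pvALoop (orig : List (List Int)) (input_sequence : List Int) (rem : List (List Int)) : List Int :=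
  match rem with
  | [] => []
  | sequence :: rest =>
      (if input_sequence.headD 0 ∈ sequence then
         1 + (if 1 < orig.length ∧ 1 < input_sequence.length then
                search_sequence_util rest input_sequence.tail
              else 0)
       else 0) :: pvALoop orig input_sequence rest
termination_by (rem.length, 0)
end

-- ===== PORT B =====
-- one greedy step of Source B's loop body: pop remaining[0] if the sequence contains it
def pvBStep (remaining : List Int) (sequence : List Int) : List Int :=
  match remaining with
  | [] => remaining
  | x :: _ => if x ∈ sequence then remaining.tail else remaining

def search_sequence_util_alt (sequences : List (List Int)) (input_sequence : List Int) : Int :=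
  (input_sequence.length : Int) - ((sequences.foldl pvBStep input_sequence).length : Int)

-- ===== PRECONDITION & SPEC =====
def Spec_search_sequence_util (sequences : List (List Int)) (input_sequence : List Int) (out : Int) : Prop := out = search_sequence_util_alt sequences input_sequence
instance (sequences : List (List Int)) (input_sequence : List Int) (out : Int) : Decidable (Spec_search_sequence_util sequences input_sequence out) := by unfold Spec_search_sequence_util; infer_instance

-- ===== CLAIM (what is proved, stated in full; the proofs are below) =====
def Claim_equal_search_sequence_util : Prop := ∀ (sequences : List (List Int)) (input_sequence : List Int), Dom_search_sequence_util sequences input_sequence → Spec_search_sequence_util sequences input_sequence (search_sequence_util sequences input_sequence)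

-- ===== LEMMAS AND PROOFS =====

-- the greedy match count, as a Nat, in recursive form (proof-side specification)
def pvG : List (List Int) → List Int → Nat
  | [], _ => 0
  | _ :: _, [] => 0
  | s :: ss, x :: xs => if x ∈ s then 1 + pvG ss xs else pvG ss (x :: xs)

theorem pvG_nil_right (ss : List (List Int)) : pvG ss [] = 0 := by
  cases ss <;> rfl

-- B's fold pops exactly pvG elements
theorem pvB_fold_length (seqs : List (List Int)) :
    ∀ inp : List Int, (seqs.foldl pvBStep inp).length + pvG seqs inp = inp.length := by
  induction seqs with
  | nil => intro inp; simp [pvG]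
  | cons s ss ih =>
    intro inp
    cases inp with
    | nil =>
      have h := ih []
      rw [pvG_nil_right] at h
      simp only [List.foldl_cons, pvBStep, pvG_nil_right]
      omega
    | cons x xs =>
      by_cases hx : x ∈ s
      · have h := ih xs
        simp only [List.foldl_cons, pvBStep, if_pos hx, List.tail_cons, pvG, List.length_cons]
        omega
      · have h := ih (x :: xs)
        simp only [List.foldl_cons, pvBStep, if_neg hx, pvG, List.length_cons] at h ⊢
        omega

-- greedy exchange facts: dropping the head of the input costs at most one match,
-- and an extra leading sequence never hurts
theorem pvG_key (ss : List (List Int)) :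
    (∀ (x : Int) (xs : List Int), pvG ss (x :: xs) ≤ 1 + pvG ss xs) ∧
    (∀ (s : List Int) (inp : List Int), pvG ss inp ≤ pvG (s :: ss) inp) := by
  induction ss with
  | nil =>
    constructor
    · intro x xs; simp [pvG]
    · intro s inp
      have h0 : pvG [] inp = 0 := by cases inp <;> rfl
      rw [h0]; exact Nat.zero_le _
  | cons s0 ss ih =>
    have l1 : ∀ (s : List Int) (inp : List Int), pvG ss inp ≤ pvG (s :: ss) inp := ih.2
    have l2 : ∀ (x : Int) (xs : List Int), pvG (s0 :: ss) (x :: xs) ≤ 1 + pvG (s0 :: ss) xs := by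
      intro x xs
      by_cases hx : x ∈ s0
      · have h2 := l1 s0 xs
        simp only [pvG, if_pos hx]
        omega
      · have h1 := ih.1 x xs
        have h2 := l1 s0 xs
        calc pvG (s0 :: ss) (x :: xs) = pvG ss (x :: xs) := by simp [pvG, hx]
          _ ≤ 1 + pvG ss xs := h1
          _ ≤ 1 + pvG (s0 :: ss) xs := by omega
    refine ⟨l2, ?_⟩
    intro s inp
    cases inp with
    | nil => simp [pvG_nil_right]
    | cons x xs =>
      by_cases hx : x ∈ s
      · have h := l2 x xs
        calc pvG (s0 :: ss) (x :: xs) ≤ 1 + pvG (s0 :: ss) xs := h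
          _ = pvG (s :: s0 :: ss) (x :: xs) := by simp [pvG, hx]
      · have : pvG (s :: s0 :: ss) (x :: xs) = pvG (s0 :: ss) (x :: xs) := by simp [pvG, hx]
        omega

-- A's candidate list, with the redundant `len(sequences) > 1 and len(input_sequence) > 1`
-- guard eliminated (in the cases the guard cuts, the recursive call returns 0 anyway)
def pvCands : List (List Int) → Int → List Int → List Int
  | [], _, _ => []
  | s :: rest, x, xs =>
      (if x ∈ s then 1 + search_sequence_util rest xs else 0) :: pvCands rest x xs

theorem pvA_nil_right (ss : List (List Int)) : search_sequence_util ss [] = 0 := by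
  rw [search_sequence_util]; simp

theorem pvALoop_eq_cands (orig : List (List Int)) (x : Int) (xs : List Int) :
    ∀ rem : List (List Int), rem.length ≤ orig.length →
      pvALoop orig (x :: xs) rem = pvCands rem x xs := by
  intro rem
  induction rem with
  | nil => intro _; simp [pvALoop, pvCands]
  | cons s rest ih =>
    intro hlen
    rw [pvALoop, pvCands, ih (by simp only [List.length_cons] at hlen; omega)]
    congr 1
    by_cases hx : x ∈ s
    · rw [List.headD_cons, if_pos hx, if_pos hx]
      congr 1
      by_cases hg : 1 < orig.length ∧ 1 < (x :: xs).length
      · rw [if_pos hg, List.tail_cons]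
      · rw [if_neg hg]
        rcases xs with _ | ⟨y, ys⟩
        · rw [pvA_nil_right]
        · -- the guard fails only because orig has ≤ 1 element, so rest = []
          have horig : orig.length ≤ 1 := by
            by_contra hc
            exact hg ⟨by omega, by simp⟩
          have hrest : rest = [] := by
            simp only [List.length_cons] at hlen
            exact List.length_eq_zero_iff.mp (by omega)
          subst hrest
          rw [search_sequence_util]; simp
    · rw [List.headD_cons, if_neg hx, if_neg hx]

theorem pvA_nonneg : ∀ n (seqs : List (List Int)) (inp : List Int), seqs.length ≤ n →
    0 ≤ search_sequence_util seqs inp := by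
  intro n
  induction n with
  | zero =>
    intro seqs inp h
    have : seqs = [] := List.length_eq_zero_iff.mp (by omega)
    subst this; rw [search_sequence_util]; simp
  | succ n ih =>
    intro seqs inp h
    rcases seqs with _ | ⟨s, ss⟩
    · rw [search_sequence_util]; simp
    rcases inp with _ | ⟨x, xs⟩
    · rw [pvA_nil_right]
    rw [search_sequence_util, if_neg (by simp)]
    rw [pvALoop_eq_cands _ x xs _ (le_refl _)]
    have hss : ss.length ≤ n := by simp only [List.length_cons] at h; omega
    have hmem : ∀ rem : List (List Int), rem.length ≤ ss.length →
        ∀ y ∈ pvCands rem x xs, (0:Int) ≤ y := by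
      intro rem
      induction rem with
      | nil => intro _ y hy; simp [pvCands] at hy
      | cons s' rest ih' =>
        intro hlen y hy
        rw [pvCands] at hy
        rcases List.mem_cons.mp hy with h1 | h2
        · subst h1
          by_cases hx : x ∈ s'
          · have := ih rest xs (by simp only [List.length_cons] at hlen; omega)
            rw [if_pos hx]; omega
          · rw [if_neg hx]
        · exact ih' (by simp only [List.length_cons] at hlen; omega) y h2
    rcases hc : PySem.List.max? (pvCands (s :: ss) x xs) (fun y => y) with _ | m
    · simp
    · have hm : m ∈ pvCands (s :: ss) x xs := PySem.List.max?_mem hc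
      have hnn : (0:Int) ≤ m := by
        rw [pvCands] at hm
        rcases List.mem_cons.mp hm with h1 | h2
        · subst h1
          by_cases hx : x ∈ s
          · have := ih ss xs hss
            rw [if_pos hx]; omega
          · rw [if_neg hx]
        · exact hmem ss (le_refl _) m h2
      simpa using hnn

theorem pvCand0_nonneg (s : List Int) (ss : List (List Int)) (x : Int) (xs : List Int) :
    (0:Int) ≤ if x ∈ s then 1 + search_sequence_util ss xs else 0 := by
  by_cases hx : x ∈ s
  · have := pvA_nonneg ss.length ss xs (le_refl _)
    rw [if_pos hx]; omega
  · rw [if_neg hx]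

theorem pvCands_foldl_max : ∀ (ss : List (List Int)) (x : Int) (xs : List Int) (e : Int),
    0 ≤ e → (pvCands ss x xs).foldl max e = max e (search_sequence_util ss (x :: xs)) := by
  intro ss
  induction ss with
  | nil =>
    intro x xs e he
    rw [pvCands, search_sequence_util]
    simp [max_eq_left he]
  | cons s rest ih =>
    intro x xs e he
    rw [pvCands, List.foldl_cons]
    have he0 := pvCand0_nonneg s rest x xs
    rw [ih x xs _ (le_trans he0 (le_max_right _ _))]
    have hrec : search_sequence_util (s :: rest) (x :: xs)
        = max (if x ∈ s then 1 + search_sequence_util rest xs else 0)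
              (search_sequence_util rest (x :: xs)) := by
      rw [search_sequence_util, if_neg (by simp)]
      rw [pvALoop_eq_cands _ x xs _ (le_refl _), pvCands]
      rw [PySem.List.max?_id_cons]
      rw [Option.getD_some]
      exact ih x xs _ he0
    rw [hrec, max_assoc]

theorem pvA_rec (s : List Int) (ss : List (List Int)) (x : Int) (xs : List Int) :
    search_sequence_util (s :: ss) (x :: xs)
      = max (if x ∈ s then 1 + search_sequence_util ss xs else 0)
            (search_sequence_util ss (x :: xs)) := by
  rw [search_sequence_util, if_neg (by simp)]
  rw [pvALoop_eq_cands _ x xs _ (le_refl _), pvCands]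
  rw [PySem.List.max?_id_cons, Option.getD_some]
  exact pvCands_foldl_max ss x xs _ (pvCand0_nonneg s ss x xs)

theorem pvA_eq_g : ∀ (seqs : List (List Int)) (inp : List Int),
    search_sequence_util seqs inp = (pvG seqs inp : Int) := by
  intro seqs
  induction seqs with
  | nil => intro inp; rw [search_sequence_util]; simp [pvG]
  | cons s ss ih =>
    intro inp
    rcases inp with _ | ⟨x, xs⟩
    · rw [pvA_nil_right, pvG_nil_right]; rfl
    rw [pvA_rec, ih xs, ih (x :: xs)]
    by_cases hx : x ∈ s
    · have hle := (pvG_key ss).1 x xs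
      rw [if_pos hx, max_eq_left (by omega)]
      have : pvG (s :: ss) (x :: xs) = 1 + pvG ss xs := by simp [pvG, hx]
      rw [this]; push_cast; ring
    · rw [if_neg hx, max_eq_right (by omega)]
      have : pvG (s :: ss) (x :: xs) = pvG ss (x :: xs) := by simp [pvG, hx]
      rw [this]

-- ===== VERDICT (by name: the statement is the Claim_ definition above) =====
theorem search_sequence_util_spec : Claim_equal_search_sequence_util := by
  intro sequences input_sequence _
  unfold Spec_search_sequence_util search_sequence_util_alt
  rw [pvA_eq_g]
  have h := pvB_fold_length sequences input_sequence
  omega
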